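-- pv_equiv track=rewrite | github.com/dbwls99706/practice | 프로그래머스/0/181874. A 강조하기/A 강조하기.py | solution
-- ===== SOURCE A (Python) =====
-- def solution(myString):
--     answer = ''
--     for i in myString:
--         if i == 'a' or i == 'A':
--             answer += 'A'
--         elif i.isupper():
--             answer += i.lower()
--         else:
--             answer += i
--     return answer
-- ===== SOURCE B (Python) =====
-- def solution(myString):
--     return myString.lower().replace('a', 'A')
-- ===== Notes on version B (the rewrite author's own statement) =====
-- stated objective: idiomatic
-- what changed: Replaces the per-character loop with if/elif branching by two whole-string built-in passes: lowercase everything, then promote each lowercase letter a to uppercase via str.replace.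
import Mathlib
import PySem

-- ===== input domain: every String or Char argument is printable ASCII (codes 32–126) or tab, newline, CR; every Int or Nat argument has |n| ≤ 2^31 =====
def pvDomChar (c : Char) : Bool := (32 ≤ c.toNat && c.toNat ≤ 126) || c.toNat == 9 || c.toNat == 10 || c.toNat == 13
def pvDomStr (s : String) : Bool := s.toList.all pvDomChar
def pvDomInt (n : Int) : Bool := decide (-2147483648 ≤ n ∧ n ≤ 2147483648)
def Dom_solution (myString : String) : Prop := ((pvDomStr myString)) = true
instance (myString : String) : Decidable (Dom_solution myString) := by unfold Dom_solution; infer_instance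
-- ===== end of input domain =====

-- B replaces A's per-character loop (if/elif branching, appending to an accumulator) by two
-- whole-string passes: lowercase everything, then promote each lowercase letter a back to uppercase with str.replace — idiomatic; no speed claim.


-- ===== PORT A =====
-- for-loop over the characters, building 'answer' by appends, branches in A's order
def solution (myString : String) : String :=
  String.ofList (myString.toList.foldl
    (fun answer i =>
      if i = 'a' ∨ i = 'A' then answer ++ ['A']
      else if PySem.Chars.isupper i then answer ++ [PySem.Chars.lowerChar i]
      else answer ++ [i])
    [])

-- ===== PORT B =====
def solution_alt (myString : String) : String :=
  PySem.Str.replace (PySem.Str.lower myString) "a" "A"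

-- ===== PRECONDITION & SPEC =====
def Spec_solution (myString : String) (out : String) : Prop := out = solution_alt myString
instance (myString : String) (out : String) : Decidable (Spec_solution myString out) := by unfold Spec_solution; infer_instance

-- ===== CLAIM (what is proved, stated in full; the proofs are below) =====
def Claim_equal_solution : Prop := ∀ (myString : String), Dom_solution myString → Spec_solution myString (solution myString)

-- ===== LEMMAS AND PROOFS =====

-- replace with a single-character pattern is a pointwise map
theorem replace_go_singleton (l acc : List Char) (fuel : Nat) (h : l.length ≤ fuel) :
    PySem.Chars.replace.go ['a'] ['A'] fuel l acc
      = acc.reverse ++ l.map (fun c => if c = 'a' then 'A' else c) := by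
  induction fuel generalizing l acc with
  | zero =>
    cases l with
    | nil => simp [PySem.Chars.replace.go]
    | cons c t => simp at h
  | succ n ih =>
    cases l with
    | nil => simp [PySem.Chars.replace.go]
    | cons c t =>
      simp only [List.length_cons, Nat.succ_le_succ_iff] at h
      by_cases hc : c = 'a'
      · subst hc
        have hp : List.isPrefixOf ['a'] ('a' :: t) = true := by
          simp [List.isPrefixOf]
        simp only [PySem.Chars.replace.go, hp, if_pos]
        rw [show List.drop (['a'].length) ('a' :: t) = t from rfl,
            show (['A'].reverse ++ acc) = 'A' :: acc from rfl,
            ih t ('A' :: acc) h]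
        simp
      · have hp : List.isPrefixOf ['a'] (c :: t) = false := by
          simp [List.isPrefixOf]
          exact Ne.symm hc
        simp only [PySem.Chars.replace.go, hp]
        rw [if_neg (by simp), ih t (c :: acc) h]
        simp [hc]

theorem replace_singleton (l : List Char) :
    PySem.Chars.replace l ['a'] ['A'] = l.map (fun c => if c = 'a' then 'A' else c) := by
  rw [PySem.Chars.replace, if_neg (by simp)]
  simpa using replace_go_singleton l [] l.length le_rfl

-- A's per-character branch equals lowercase-then-promote
theorem branch_eq (c : Char) :
    (if c = 'a' ∨ c = 'A' then 'A'
     else if PySem.Chars.isupper c then PySem.Chars.lowerChar c else c)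
      = (if PySem.Chars.lowerChar c = 'a' then 'A' else PySem.Chars.lowerChar c) := by
  by_cases h1 : c = 'a'
  · subst h1; decide
  by_cases h2 : c = 'A'
  · subst h2; decide
  by_cases h3 : PySem.Chars.isupper c = true
  · -- uppercase and not 'A': its lowercase has code c.toNat + 32 ≠ 97, so it is not 'a'
    have h3' := h3
    simp only [PySem.Chars.isupper, Bool.and_eq_true, decide_eq_true_eq] at h3'
    have hle : c.toNat ≤ 90 := by
      have hz := UInt32.le_iff_toNat_le.mp (Char.le_def.mp h3'.2)
      have h90 : ('Z' : Char).val.toNat = 90 := by decide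
      have hcv : c.toNat = c.val.toNat := rfl
      omega
    have hv : (c.toNat + 32).isValidChar := Or.inl (by omega)
    have hne : PySem.Chars.lowerChar c ≠ 'a' := by
      rw [PySem.Chars.lowerChar, if_pos h3]
      intro hcontra
      have ht : (Char.ofNat (c.toNat + 32)).toNat = ('a' : Char).toNat := by rw [hcontra]
      have hofnat : (Char.ofNat (c.toNat + 32)).toNat = c.toNat + 32 := by
        unfold Char.ofNat
        rw [dif_pos hv]
        rfl
      rw [hofnat] at ht
      apply h2
      apply Char.ext
      apply UInt32.toNat_inj.mp
      have h97 : ('a' : Char).toNat = 97 := rfl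
      have h65 : ('A' : Char).val.toNat = 65 := by decide
      have hcv : c.toNat = c.val.toNat := rfl
      omega
    rw [if_neg (by simp [h1, h2]), if_pos h3, if_neg hne]
  · have h3' : PySem.Chars.isupper c = false := by
      cases hb : PySem.Chars.isupper c
      · rfl
      · exact absurd hb h3
    have hl : PySem.Chars.lowerChar c = c := by
      simp [PySem.Chars.lowerChar, h3']
    rw [if_neg (by simp [h1, h2]), if_neg (by simp [h3']), hl, if_neg h1]

-- A's foldl with pure appends is a map
theorem foldl_eq_map (l : List Char) (acc : List Char) :
    l.foldl
      (fun answer i =>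
        if i = 'a' ∨ i = 'A' then answer ++ ['A']
        else if PySem.Chars.isupper i then answer ++ [PySem.Chars.lowerChar i]
        else answer ++ [i]) acc
      = acc ++ l.map (fun c =>
          if c = 'a' ∨ c = 'A' then 'A'
          else if PySem.Chars.isupper c then PySem.Chars.lowerChar c else c) := by
  induction l generalizing acc with
  | nil => simp
  | cons c t ih =>
    simp only [List.foldl_cons, List.map_cons]
    split_ifs with h1 h2 <;> rw [ih] <;> simp

-- ===== VERDICT (by name: the statement is the Claim_ definition above) =====
theorem solution_spec : Claim_equal_solution := by
  unfold Claim_equal_solution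
  intro s _
  unfold Spec_solution solution solution_alt
  apply String.ext
  rw [foldl_eq_map]
  simp only [PySem.Str.replace, PySem.Str.lower, PySem.Chars.lower, String.toList_ofList,
    List.nil_append]
  rw [show ("a" : String).toList = ['a'] from rfl, show ("A" : String).toList = ['A'] from rfl]
  rw [replace_singleton, List.map_map]
  apply List.map_congr_left
  intro c _
  simpa [Function.comp] using branch_eq c
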